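-- pv_equiv track=rewrite | github.com/JoseCerezo90/TFM-Construccion-evolutiva-de-redes-de-neuronas-con-entrenamiento-parcial | Scripts auxiliares/CE_&_CFG.py | sustituirRegla
-- ===== SOURCE A (Python) =====
-- def sustituirRegla(arbol, regla, no_terminal):
--     new_arbol = ''
--     sustituido = False
--     for i in range(len(arbol)):
--         if arbol[i] == no_terminal and not sustituido:
--             new_arbol += regla
--             sustituido = True
--         else:
--             new_arbol += arbol[i]
--     return new_arbol
-- ===== SOURCE B (Python) =====
-- def sustituirRegla(arbol, regla, no_terminal):
--     idx = next((i for i, c in enumerate(arbol) if c == no_terminal), None)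
--     if idx is None:
--         return arbol
--     return arbol[:idx] + regla + arbol[idx+1:]
-- ===== Notes on version B (the rewrite author's own statement) =====
-- stated objective: simpler
-- what changed: Replaces the accumulate-with-flag single pass by locate-the-first-matching-character-then-splice-via-slicing; no-match returns the input unchanged instead of a rebuilt copy.
import Mathlib
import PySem

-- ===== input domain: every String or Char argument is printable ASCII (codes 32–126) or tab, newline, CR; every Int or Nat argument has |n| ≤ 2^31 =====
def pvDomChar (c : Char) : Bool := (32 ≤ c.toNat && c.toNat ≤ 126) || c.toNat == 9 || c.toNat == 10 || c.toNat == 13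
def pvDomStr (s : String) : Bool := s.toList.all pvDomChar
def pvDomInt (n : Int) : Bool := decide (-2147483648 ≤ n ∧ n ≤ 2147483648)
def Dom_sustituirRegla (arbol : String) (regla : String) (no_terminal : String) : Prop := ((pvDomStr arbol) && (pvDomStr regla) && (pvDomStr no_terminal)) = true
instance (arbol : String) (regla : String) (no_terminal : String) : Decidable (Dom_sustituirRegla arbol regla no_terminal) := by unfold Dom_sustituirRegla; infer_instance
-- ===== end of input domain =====

-- B replaces A's accumulate-with-flag pass by locate-the-first-match-then-splice (simpler decomposition; return value only).

-- ===== PORT A =====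
-- the for-loop over range(len(arbol)) with accumulator new_arbol and flag sustituido
def sustituirReglaGo (regla : String) (no_terminal : String) :
    List Char → List Char → Bool → List Char
  | [], acc, _ => acc
  | c :: cs, acc, sustituido =>
    if (String.mk [c] == no_terminal) && !sustituido then
      sustituirReglaGo regla no_terminal cs (acc ++ regla.toList) true
    else
      sustituirReglaGo regla no_terminal cs (acc ++ [c]) sustituido

def sustituirRegla (arbol : String) (regla : String) (no_terminal : String) : String :=
  String.mk (sustituirReglaGo regla no_terminal arbol.toList [] false)

-- ===== PORT B =====
-- index of the first character equal (as a 1-char string) to no_terminal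
def sustituirReglaIdx (no_terminal : String) : List Char → Option Nat
  | [] => none
  | c :: cs =>
    if String.mk [c] == no_terminal then some 0
    else (sustituirReglaIdx no_terminal cs).map (· + 1)

def sustituirRegla_alt (arbol : String) (regla : String) (no_terminal : String) : String :=
  match sustituirReglaIdx no_terminal arbol.toList with
  | none => arbol
  | some i => String.mk (arbol.toList.take i ++ regla.toList ++ arbol.toList.drop (i + 1))

-- ===== PRECONDITION & SPEC =====
def Spec_sustituirRegla (arbol : String) (regla : String) (no_terminal : String) (out : String) : Prop := out = sustituirRegla_alt arbol regla no_terminal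
instance (arbol : String) (regla : String) (no_terminal : String) (out : String) : Decidable (Spec_sustituirRegla arbol regla no_terminal out) := by unfold Spec_sustituirRegla; infer_instance

-- ===== CLAIM (what is proved, stated in full; the proofs are below) =====
def Claim_equal_sustituirRegla : Prop := ∀ (arbol : String) (regla : String) (no_terminal : String), Dom_sustituirRegla arbol regla no_terminal → Spec_sustituirRegla arbol regla no_terminal (sustituirRegla arbol regla no_terminal)

-- ===== LEMMAS AND PROOFS =====

-- once the flag is set, the loop just copies the rest
theorem sustituirReglaGo_true (regla no_terminal : String) :
    ∀ (cs acc : List Char),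
      sustituirReglaGo regla no_terminal cs acc true = acc ++ cs := by
  intro cs
  induction cs with
  | nil => intro acc; simp [sustituirReglaGo]
  | cons c cs ih =>
    intro acc
    simp [sustituirReglaGo, ih]

-- the unflagged loop equals "splice at the first match (if any)"
theorem sustituirReglaGo_false (regla no_terminal : String) :
    ∀ (cs acc : List Char),
      sustituirReglaGo regla no_terminal cs acc false =
        acc ++ (match sustituirReglaIdx no_terminal cs with
                | none => cs
                | some i => cs.take i ++ regla.toList ++ cs.drop (i + 1)) := by
  intro cs
  induction cs with
  | nil => intro acc; simp [sustituirReglaGo, sustituirReglaIdx]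
  | cons c cs ih =>
    intro acc
    by_cases h : (String.mk [c] == no_terminal) = true
    · simp [sustituirReglaGo, sustituirReglaIdx, h, sustituirReglaGo_true]
    · simp only [sustituirReglaGo, sustituirReglaIdx, h, Bool.false_and, if_neg,
        Bool.false_eq_true, not_false_eq_true]
      rw [ih]
      cases hidx : sustituirReglaIdx no_terminal cs with
      | none => simp
      | some i => simp

theorem sustituirRegla_eq (arbol regla no_terminal : String) :
    sustituirRegla arbol regla no_terminal = sustituirRegla_alt arbol regla no_terminal := by
  unfold sustituirRegla sustituirRegla_alt
  rw [sustituirReglaGo_false]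
  cases h : sustituirReglaIdx no_terminal arbol.toList with
  | none => exact String.ofList_toList
  | some i => simp

-- ===== VERDICT (by name: the statement is the Claim_ definition above) =====
theorem sustituirRegla_spec : Claim_equal_sustituirRegla := by
  intro arbol regla no_terminal _
  unfold Spec_sustituirRegla
  exact sustituirRegla_eq arbol regla no_terminal
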